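-- pv_equiv track=rewrite | github.com/khuang9/health_log | health_logs/views.py | count_workouts
-- ===== SOURCE A (Python) =====
-- def count_workouts(workout_days):
--   new_workout_days = [workout_days[0]]
--   counter = [0]*(max(workout_days) + 1)
--
--   for i in range(len(workout_days)):
--     counter[workout_days[i]] += 1
--
--     try:
--       if workout_days[i+1] != workout_days[i]:
--         new_workout_days.append(workout_days[i+1])
--
--     except IndexError:
--       pass
--
--   return counter, new_workout_days
-- ===== SOURCE B (Python) =====
-- def count_workouts(workout_days):
--     # Aggregate counts per distinct value first, then scatter once per distinct value.
--     counts = {}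
--     for v in workout_days:
--         counts[v] = counts.get(v, 0) + 1
--     counter = [0] * (max(workout_days) + 1)
--     for v, k in counts.items():
--         counter[v] += k
--     # Consecutive-distinct list by skipping whole runs.
--     new_workout_days = []
--     i, n = 0, len(workout_days)
--     while i < n:
--         v = workout_days[i]
--         new_workout_days.append(v)
--         while i < n and workout_days[i] == v:
--             i += 1
--     return counter, new_workout_days
-- ===== Notes on version B (the rewrite author's own statement) =====
-- stated objective: alternative
-- what changed: The counter is built aggregate-then-scatter (a dict of per-value totals collected first, then written into the list once per distinct value) instead of A's per-element increments, and the consecutive-distinct list is built by an outer/inner run-skipping loop instead of A's per-index try/except lookahead.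
import Mathlib
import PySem

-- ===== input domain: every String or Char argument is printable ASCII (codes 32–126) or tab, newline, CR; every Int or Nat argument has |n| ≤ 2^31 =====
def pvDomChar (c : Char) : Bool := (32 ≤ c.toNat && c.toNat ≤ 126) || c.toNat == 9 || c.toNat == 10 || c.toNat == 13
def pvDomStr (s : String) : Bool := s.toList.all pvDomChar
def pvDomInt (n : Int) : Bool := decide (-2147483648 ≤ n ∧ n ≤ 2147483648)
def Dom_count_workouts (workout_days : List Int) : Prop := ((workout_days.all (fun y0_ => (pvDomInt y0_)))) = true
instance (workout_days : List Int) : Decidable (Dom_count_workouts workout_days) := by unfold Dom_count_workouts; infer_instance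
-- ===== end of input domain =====

-- B replaces A's fused per-index loop (increment-by-one plus try/except lookahead) by a staged
-- aggregate-then-scatter count (a first-occurrence dict of per-value totals written once per
-- distinct value) and a run-skipping loop for the consecutive-distinct list (alternative, same cost).

-- ===== PORT A =====
-- `counter[i] += 1` with Python index semantics (negative index counts from the end);
-- out-of-range (an IndexError in Python) is excluded by Pre_ below.
def pyIncr (c : List Int) (i : Int) : List Int :=
  let j : Int := if i < 0 then i + c.length else i
  c.set j.toNat (c.getD j.toNat 0 + 1)

def count_workouts (workout_days : List Int) : List Int × List Int :=
  let n := workout_days.length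
  let new0 : List Int := [workout_days.getD 0 0]   -- list holding the first element; Pre_ gives a nonempty list
  let mx : Int := (PySem.List.max? workout_days (fun y => y)).getD 0   -- max(workout_days); Pre_ gives nonempty
  let counter0 : List Int := List.replicate (mx + 1).toNat 0   -- [0]*(max+1); empty when max+1 ≤ 0, like Python
  (List.range n).foldl
    (fun st i =>
      (pyIncr st.1 (workout_days.getD i 0),
       -- try: if workout_days[i+1] != workout_days[i]: append  except IndexError: pass
       if i + 1 < n then
         (if workout_days.getD (i + 1) 0 ≠ workout_days.getD i 0 then
            st.2 ++ [workout_days.getD (i + 1) 0]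
          else st.2)
       else st.2))
    (counter0, new0)

-- ===== PORT B =====
-- `counter[v] += k`, the same Python index semantics as pyIncr but adding k
def pyIncrBy (c : List Int) (i k : Int) : List Int :=
  let j : Int := if i < 0 then i + c.length else i
  c.set j.toNat (c.getD j.toNat 0 + k)

-- the inner `while i < n and workout_days[i] == v: i += 1` of Source B: skip the leading run of v
def dropRun (v : Int) : List Int → List Int
  | [] => []
  | x :: t => if x = v then dropRun v t else x :: t

theorem dropRun_length_le (v : Int) : ∀ t : List Int, (dropRun v t).length ≤ t.length := by
  intro t
  induction t with
  | nil => simp [dropRun]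
  | cons x s ih =>
      by_cases h : x = v
      · simp only [dropRun, if_pos h, List.length_cons]; omega
      · simp [dropRun, h]

-- the outer while loop of Source B: append the run's first element, then skip that run
def runs : List Int → List Int
  | [] => []
  | x :: t => x :: runs (dropRun x t)
  termination_by l => l.length
  decreasing_by simp only [List.length_cons]; exact Nat.lt_succ_of_le (dropRun_length_le x t)

def count_workouts_alt (workout_days : List Int) : List Int × List Int :=
  -- counts[v] = counts.get(v, 0) + 1 over the list
  let counts := workout_days.foldl (fun d v => d.insert v (d.getD v 0 + 1)) PySem.Dict.empty
  let mx : Int := (PySem.List.max? workout_days (fun y => y)).getD 0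
  -- for v, k in counts.items(): counter[v] += k
  let counter := counts.items.foldl (fun c p => pyIncrBy c p.1 p.2)
    (List.replicate (mx + 1).toNat 0)
  (counter, runs workout_days)

-- ===== PRECONDITION & SPEC =====
-- Pre_ is exactly where Python A returns: the list is nonempty (else the initial first-element access raises
-- IndexError) and every value v satisfies v ≥ -(max+1), i.e. indexes the length-(max+1) counter
-- without IndexError (negative values down to -(max+1) wrap around, and both programs wrap alike).
def Pre_count_workouts (workout_days : List Int) : Prop :=
  workout_days ≠ [] ∧
    ∀ v ∈ workout_days, 0 ≤ ((PySem.List.max? workout_days (fun y => y)).getD 0) + 1 + v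
instance (workout_days : List Int) : Decidable (Pre_count_workouts workout_days) := by
  unfold Pre_count_workouts; infer_instance

def pvWitness_count_workouts : List Int := [1, 2, 2, 0, 2]

def Spec_count_workouts (workout_days : List Int) (out : List Int × List Int) : Prop := out = count_workouts_alt workout_days
instance (workout_days : List Int) (out : List Int × List Int) : Decidable (Spec_count_workouts workout_days out) := by unfold Spec_count_workouts; infer_instance

-- ===== CLAIM (what is proved, stated in full; the proofs are below) =====
def Claim_equal_count_workouts : Prop := ∀ (workout_days : List Int), Dom_count_workouts workout_days → Pre_count_workouts workout_days → Spec_count_workouts workout_days (count_workouts workout_days)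

-- ===== LEMMAS AND PROOFS =====

-- ---- generic fold shapes ----

-- a fold whose two state components are updated independently splits into two folds
theorem foldl_pair_split {α β γ : Type} (f : α → γ → α) (g : β → γ → β) :
    ∀ (l : List γ) (a : α) (b : β),
      l.foldl (fun st i => (f st.1 i, g st.2 i)) (a, b) = (l.foldl f a, l.foldl g b) := by
  intro l
  induction l with
  | nil => intro a b; rfl
  | cons x t ih => intro a b; simpa using ih (f a x) (g b x)

-- a fold over range(len xs) reading xs[i] is a fold over xs
theorem foldl_range_getD {α : Type} (g : α → Int → α) :
    ∀ (xs : List Int) (init : α),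
      (List.range xs.length).foldl (fun c i => g c (xs.getD i 0)) init = xs.foldl g init := by
  intro xs
  induction xs with
  | nil => intro init; rfl
  | cons x t ih =>
      intro init
      rw [List.length_cons, List.range_succ_eq_map, List.foldl_cons, List.foldl_map]
      simpa [List.getD_cons_succ, List.getD_cons_zero] using ih (g init x)

-- ---- the counter component ----

-- the Nat the Python index i lands on in a list of c.length slots
def pyIdxT (c : List Int) (i : Int) : Nat := (if i < 0 then i + (c.length : Int) else i).toNat

theorem getD_set_self (c : List Int) (t : Nat) (x : Int) (h : t < c.length) :
    (c.set t x).getD t 0 = x := by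
  simp [List.getD_eq_getElem?_getD, h]

theorem getD_set_ne (c : List Int) (t s : Nat) (x : Int) (h : t ≠ s) :
    (c.set s x).getD t 0 = c.getD t 0 := by
  simp [List.getD_eq_getElem?_getD, List.getElem?_set_ne (Ne.symm h)]

theorem set_getD_self (c : List Int) (t : Nat) (h : t < c.length) :
    c.set t (c.getD t 0) = c := by
  rw [List.getD_eq_getElem?_getD]
  simp [List.getElem?_eq_getElem h, List.set_getElem_self]

theorem pyIncrBy_zero (c : List Int) (v : Int) : pyIncrBy c v 0 = c := by
  show c.set (pyIdxT c v) (c.getD (pyIdxT c v) 0 + 0) = c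
  by_cases h : pyIdxT c v < c.length
  · rw [add_zero]; exact set_getD_self c _ h
  · exact List.set_eq_of_length_le (Nat.le_of_not_lt h)

-- incrementing once and then adding k is adding k+1
theorem pyIncrBy_pyIncr (c : List Int) (v k : Int) :
    pyIncrBy (pyIncr c v) v k = pyIncrBy c v (k + 1) := by
  have ht : pyIdxT (pyIncr c v) v = pyIdxT c v := by simp [pyIdxT, pyIncr]
  show (pyIncr c v).set (pyIdxT (pyIncr c v) v) ((pyIncr c v).getD (pyIdxT (pyIncr c v) v) 0 + k)
      = c.set (pyIdxT c v) (c.getD (pyIdxT c v) 0 + (k + 1))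
  have ev : pyIncr c v = c.set (pyIdxT c v) (c.getD (pyIdxT c v) 0 + 1) := rfl
  rw [ht, ev]
  by_cases h : pyIdxT c v < c.length
  · rw [getD_set_self _ _ _ h, List.set_set]
    congr 1
    ring
  · have hle := Nat.le_of_not_lt h
    simp only [List.set_eq_of_length_le hle]

-- n single increments at the same value are one addition of n
theorem foldl_pyIncr_replicate (v : Int) : ∀ (n : Nat) (c : List Int),
    (List.replicate n v).foldl (fun c d => pyIncr c d) c = pyIncrBy c v (n : Int) := by
  intro n
  induction n with
  | zero => intro c; simpa using (pyIncrBy_zero c v).symm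
  | succ m ih =>
      intro c
      rw [List.replicate_succ, List.foldl_cons, ih (pyIncr c v), pyIncrBy_pyIncr]
      congr 1

theorem pyIncr_comm (c : List Int) (a b : Int) :
    pyIncr (pyIncr c a) b = pyIncr (pyIncr c b) a := by
  have hia : pyIdxT (pyIncr c a) b = pyIdxT c b := by simp [pyIdxT, pyIncr]
  have hib : pyIdxT (pyIncr c b) a = pyIdxT c a := by simp [pyIdxT, pyIncr]
  have ea : pyIncr c a = c.set (pyIdxT c a) (c.getD (pyIdxT c a) 0 + 1) := rfl
  have eb : pyIncr c b = c.set (pyIdxT c b) (c.getD (pyIdxT c b) 0 + 1) := rfl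
  show (pyIncr c a).set (pyIdxT (pyIncr c a) b) ((pyIncr c a).getD (pyIdxT (pyIncr c a) b) 0 + 1)
      = (pyIncr c b).set (pyIdxT (pyIncr c b) a) ((pyIncr c b).getD (pyIdxT (pyIncr c b) a) 0 + 1)
  rw [hia, hib, ea, eb]
  by_cases hab : pyIdxT c a = pyIdxT c b
  · rw [hab]
  · rw [getD_set_ne c _ _ _ (fun e => hab e.symm), getD_set_ne c _ _ _ hab,
      List.set_comm _ _ hab]

-- the increment fold is invariant under permutation of the values
theorem foldl_pyIncr_perm {l₁ l₂ : List Int} (h : l₁.Perm l₂) :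
    ∀ c : List Int, l₁.foldl (fun c d => pyIncr c d) c = l₂.foldl (fun c d => pyIncr c d) c := by
  induction h with
  | nil => intro c; rfl
  | cons x _ ih => intro c; simpa using ih (pyIncr c x)
  | swap x y l => intro c; simp only [List.foldl_cons]; rw [pyIncr_comm]
  | trans _ _ ih1 ih2 => intro c; rw [ih1 c, ih2 c]

theorem count_flatMap_rep (xs : List Int) : ∀ (ks : List Int) (a : Int),
    (ks.flatMap fun k => List.replicate (xs.count k) k).count a = ks.count a * xs.count a := by
  intro ks
  induction ks with
  | nil => intro a; simp
  | cons k t ih =>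
      intro a
      rw [List.flatMap_cons, List.count_append, ih a, List.count_replicate]
      by_cases h : k = a
      · subst h; simp [List.count_cons]; ring
      · simp [List.count_cons, h, Ne.symm h]

-- xs is a rearrangement of "each distinct value, repeated its multiplicity"
theorem perm_flatMap_rep (xs : List Int) :
    ((PySem.Set.ofList xs).flatMap fun k => List.replicate (xs.count k) k).Perm xs := by
  rw [List.perm_iff_count]
  intro a
  rw [count_flatMap_rep]
  by_cases h : a ∈ xs
  · rw [List.count_eq_one_of_mem (PySem.Set.nodup_ofList xs) ((PySem.Set.mem_ofList xs a).mpr h),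
      one_mul]
  · rw [List.count_eq_zero_of_not_mem h, mul_zero]

-- scattering (value, multiplicity) pairs is folding single increments over the expanded list
theorem scatter_eq (xs : List Int) : ∀ (ks : List Int) (c : List Int),
    (ks.map fun k => (k, (xs.count k : Int))).foldl (fun c p => pyIncrBy c p.1 p.2) c
      = (ks.flatMap fun k => List.replicate (xs.count k) k).foldl (fun c d => pyIncr c d) c := by
  intro ks
  induction ks with
  | nil => intro c; rfl
  | cons k t ih =>
      intro c
      rw [List.map_cons, List.foldl_cons, ih (pyIncrBy c k (xs.count k)),
        List.flatMap_cons, List.foldl_append, foldl_pyIncr_replicate]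

-- A's per-element increments equal B's dict-then-scatter
theorem counters_eq (xs : List Int) (c : List Int) :
    xs.foldl (fun c d => pyIncr c d) c
      = ((xs.foldl (fun d v => d.insert v (d.getD v 0 + 1)) PySem.Dict.empty).items).foldl
          (fun c p => pyIncrBy c p.1 p.2) c := by
  rw [PySem.Dict.foldl_insert_getD_add_one_eq_counter, PySem.Dict.items_counter, scatter_eq]
  exact (foldl_pyIncr_perm (perm_flatMap_rep xs) c).symm

-- ---- the consecutive-distinct component ----

-- keep-if-differs-from-previous, A's shape of the dedup (proof-side characterisation)
def pairKeys : List Int → List Int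
  | [] => []
  | [x] => [x]
  | x :: y :: t => if x = y then pairKeys (y :: t) else x :: pairKeys (y :: t)

theorem runs_eq_pairKeys_aux : ∀ (n : Nat) (l : List Int), l.length ≤ n → runs l = pairKeys l := by
  intro n
  induction n with
  | zero =>
      intro l h
      have hl : l = [] := List.eq_nil_of_length_eq_zero (Nat.le_zero.mp h)
      subst hl
      rw [runs, pairKeys]
  | succ m ih =>
      intro l h
      cases l with
      | nil => rw [runs, pairKeys]
      | cons x l' =>
        cases l' with
        | nil =>
            rw [runs]
            simp [dropRun, runs, pairKeys]
        | cons y t =>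
            by_cases hxy : y = x
            · subst hxy
              have h1 : runs (y :: y :: t) = runs (y :: t) := by
                conv_lhs => rw [runs]
                conv_rhs => rw [runs]
                simp [dropRun]
              have h2 : (y :: t).length ≤ m := by simp at h ⊢; omega
              rw [h1, ih (y :: t) h2]
              conv_rhs => rw [pairKeys]
              simp
            · have hd : dropRun x (y :: t) = y :: t := by simp [dropRun, hxy]
              have h2 : (y :: t).length ≤ m := by simp at h ⊢; omega
              conv_lhs => rw [runs]
              rw [hd, ih (y :: t) h2]
              conv_rhs => rw [pairKeys]
              rw [if_neg (fun e => hxy e.symm)]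

theorem runs_eq_pairKeys (l : List Int) : runs l = pairKeys l :=
  runs_eq_pairKeys_aux l.length l le_rfl

-- the collected lookahead values of A's loop
def lookG (xs : List Int) : List Int :=
  ((List.range xs.length).filter
      (fun i => decide (i + 1 < xs.length) && decide (xs.getD (i + 1) 0 ≠ xs.getD i 0))).map
    (fun i => xs.getD (i + 1) 0)

theorem lookG_cons₂ (x y : Int) (t : List Int) :
    lookG (x :: y :: t) = (if y = x then [] else [y]) ++ lookG (y :: t) := by
  unfold lookG
  rw [List.length_cons, List.length_cons, List.range_succ_eq_map, List.filter_cons,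
    List.filter_map]
  have hc : ((fun i => decide (i + 1 < t.length + 1 + 1) &&
        decide ((x :: y :: t).getD (i + 1) 0 ≠ (x :: y :: t).getD i 0)) ∘ Nat.succ) =
      fun i => decide (i + 1 < (y :: t).length) &&
        decide ((y :: t).getD (i + 1) 0 ≠ (y :: t).getD i 0) := by
    funext i
    simp only [Function.comp_apply, Nat.succ_eq_add_one, List.getD_cons_succ, List.length_cons]
    congr 1
    exact decide_eq_decide.mpr (by omega)
  rw [hc]
  have hm : ((fun i => (x :: y :: t).getD (i + 1) 0) ∘ Nat.succ) =
      fun i => (y :: t).getD (i + 1) 0 := by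
    funext i; simp [Nat.succ_eq_add_one, List.getD_cons_succ]
  by_cases h : y = x
  · rw [if_pos h]
    have hcf : (decide (0 + 1 < t.length + 1 + 1) &&
        decide ((x :: y :: t).getD (0 + 1) 0 ≠ (x :: y :: t).getD 0 0)) = false := by
      simp [List.getD_cons_succ, List.getD_cons_zero, h]
    rw [hcf, if_neg (by simp), List.map_map, hm, List.nil_append]
    simp [List.length_cons]
  · rw [if_neg h]
    have hct : (decide (0 + 1 < t.length + 1 + 1) &&
        decide ((x :: y :: t).getD (0 + 1) 0 ≠ (x :: y :: t).getD 0 0)) = true := by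
      simp [List.getD_cons_succ, List.getD_cons_zero]
      exact h
    rw [hct, if_pos rfl, List.map_cons, List.map_map, hm]
    simp [List.getD_cons_succ, List.getD_cons_zero]

theorem cons_lookG_eq_pairKeys : ∀ (t : List Int) (x : Int),
    x :: lookG (x :: t) = pairKeys (x :: t) := by
  intro t
  induction t with
  | nil => intro x; simp [lookG, pairKeys, List.range_succ]
  | cons y t ih =>
      intro x
      rw [lookG_cons₂]
      by_cases h : y = x
      · subst h
        simpa [pairKeys] using ih y
      · have hxy : x ≠ y := fun e => h e.symm
        simp [pairKeys, h, hxy, ← ih y]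

-- A's new-list loop step, rewritten as the single-test append step of foldl_append_if
theorem step_eq_append_if (xs : List Int) :
    (fun (nw : List Int) (i : Nat) =>
        if i + 1 < xs.length then
          (if xs.getD (i + 1) 0 ≠ xs.getD i 0 then nw ++ [xs.getD (i + 1) 0] else nw)
        else nw) =
      fun nw i =>
        if (decide (i + 1 < xs.length) && decide (xs.getD (i + 1) 0 ≠ xs.getD i 0)) = true then
          nw ++ [xs.getD (i + 1) 0]
        else nw := by
  funext nw i
  by_cases h1 : i + 1 < xs.length <;> by_cases h2 : xs.getD (i + 1) 0 ≠ xs.getD i 0 <;>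
    simp [h1, h2]

theorem count_workouts_eq_alt (xs : List Int) (hne : xs ≠ []) :
    count_workouts xs = count_workouts_alt xs := by
  obtain ⟨x, t, rfl⟩ := List.exists_cons_of_ne_nil hne
  show (List.range (x :: t).length).foldl _ _ = _
  rw [foldl_pair_split (fun c i => pyIncr c ((x :: t).getD i 0))
        (fun nw i =>
          if i + 1 < (x :: t).length then
            (if (x :: t).getD (i + 1) 0 ≠ (x :: t).getD i 0 then
              nw ++ [(x :: t).getD (i + 1) 0]
            else nw)
          else nw)]
  unfold count_workouts_alt
  refine Prod.ext ?_ ?_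
  · show (List.range (x :: t).length).foldl _ _ = _
    rw [foldl_range_getD (fun c d => pyIncr c d) (x :: t)]
    exact counters_eq (x :: t) _
  · show (List.range (x :: t).length).foldl _ [(x :: t).getD 0 0] = runs (x :: t)
    rw [step_eq_append_if (x :: t), PySem.List.foldl_append_if, runs_eq_pairKeys]
    show [x] ++ lookG (x :: t) = pairKeys (x :: t)
    simpa using cons_lookG_eq_pairKeys t x

-- ===== VERDICT (by name: the statement is the Claim_ definition above) =====
theorem count_workouts_spec : Claim_equal_count_workouts := by
  intro xs _ hpre
  show count_workouts xs = count_workouts_alt xs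
  exact count_workouts_eq_alt xs hpre.1
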